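-- pv_equiv track=rewrite | github.com/Dipendra15-cmd/WordStatistics | word_statistics.py | shortest_words
-- ===== SOURCE A (Python) =====
-- def shortest_words(words, top_n=5):
--     result = []
--     for i in range(top_n):
--         shortest = None
--         for word in words:
--             if word not in result:
--                 if shortest is None or len(word) < len(shortest):
--                     shortest = word
--         if shortest is not None:
--             result.append(shortest)
--     return result
-- ===== SOURCE B (Python) =====
-- def shortest_words(words, top_n=5):
--     distinct = list(dict.fromkeys(words))
--     ordered = sorted(distinct, key=len)
--     return ordered[:max(top_n, 0)]
-- ===== Notes on version B (the rewrite author's own statement) =====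
-- stated objective: faster
-- what changed: A repeatedly rescans the whole list top_n times taking the first shortest word not yet selected (with a linear membership test inside); B deduplicates once preserving first occurrence, stable-sorts the distinct words by length, and slices the first max(top_n,0).
import Mathlib
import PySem

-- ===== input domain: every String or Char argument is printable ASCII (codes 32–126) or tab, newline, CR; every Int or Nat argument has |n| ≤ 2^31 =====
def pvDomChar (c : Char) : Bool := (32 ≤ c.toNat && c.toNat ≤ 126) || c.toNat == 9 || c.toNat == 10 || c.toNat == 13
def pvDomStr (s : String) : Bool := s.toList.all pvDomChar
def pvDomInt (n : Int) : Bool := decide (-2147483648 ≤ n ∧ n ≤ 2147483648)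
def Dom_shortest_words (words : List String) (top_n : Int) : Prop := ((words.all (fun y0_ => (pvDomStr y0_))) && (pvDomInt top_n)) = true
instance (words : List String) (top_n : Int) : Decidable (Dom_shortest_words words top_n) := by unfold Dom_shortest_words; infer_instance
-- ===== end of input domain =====

-- B replaces A's top_n repeated minimum-rescans of the whole list by a single dedup pass,
-- one stable sort by length, and a slice (objective: simpler; same return value).

-- ===== PORT A =====
-- 'for i in range(top_n)': range is a lazy iterator and the loop variable i is unused, so the
-- loop is ported as a recursion performing max(top_n, 0) = top_n.toNat iterations of the body.
def swLoopA (words : List String) : Nat → List String → List String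
  | 0, result => result
  | n + 1, result =>
      let shortest := words.foldl
        (fun shortest word =>
          if !(result.contains word) then
            match shortest with
            | none => some word
            | some s => if PySem.Str.len word < PySem.Str.len s then some word else shortest
          else shortest)
        none
      swLoopA words n
        (match shortest with
         | none => result
         | some s => result ++ [s])

def shortest_words (words : List String) (top_n : Int) : List String :=
  swLoopA words top_n.toNat []

-- ===== PORT B =====
def shortest_words_alt (words : List String) (top_n : Int) : List String :=
  let distinct := PySem.List.dedup words
  let ordered := PySem.List.sorted distinct PySem.Str.len
  PySem.List.slice ordered none (some (max top_n 0))

-- ===== PRECONDITION & SPEC =====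
def Spec_shortest_words (words : List String) (top_n : Int) (out : List String) : Prop := out = shortest_words_alt words top_n
instance (words : List String) (top_n : Int) (out : List String) : Decidable (Spec_shortest_words words top_n out) := by unfold Spec_shortest_words; infer_instance

-- ===== CLAIM (what is proved, stated in full; the proofs are below) =====
def Claim_equal_shortest_words : Prop := ∀ (words : List String) (top_n : Int), Dom_shortest_words words top_n → Spec_shortest_words words top_n (shortest_words words top_n)

-- ===== LEMMAS AND PROOFS =====

-- A's inner scan: first word not yet in `result` of strictly smallest length.
def swInner (words result : List String) : Option String :=
  words.foldl
    (fun shortest word =>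
      if !(result.contains word) then
        match shortest with
        | none => some word
        | some s => if PySem.Str.len word < PySem.Str.len s then some word else shortest
      else shortest)
    none

-- One iteration of A's outer loop.
def swStep (words result : List String) : List String :=
  match swInner words result with
  | none => result
  | some s => result ++ [s]

-- The stable length-sort of the deduplicated input, shared by both sides of the argument.
def swSorted (words : List String) : List String :=
  PySem.List.sorted (PySem.List.dedup words) PySem.Str.len

theorem swSorted_perm (words : List String) :
    (swSorted words).Perm (PySem.List.dedup words) :=
  PySem.List.sorted_perm _ _ _

theorem swSorted_mem (words : List String) (w : String) :
    w ∈ swSorted words ↔ w ∈ words :=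
  (swSorted_perm words).mem_iff.trans (PySem.List.mem_dedup words w)

theorem swSorted_nodup (words : List String) : (swSorted words).Nodup :=
  (swSorted_perm words).nodup_iff.mpr (PySem.List.nodup_dedup words)

theorem swSorted_mono (words : List String) {p q : Nat} (hpq : p ≤ q)
    (hq : q < (swSorted words).length) :
    PySem.Str.len ((swSorted words)[p]'(lt_of_le_of_lt hpq hq))
      ≤ PySem.Str.len ((swSorted words)[q]'hq) :=
  PySem.List.key_sorted_getElem_mono (PySem.List.dedup words) PySem.Str.len hpq hq

theorem swLoopA_step (words : List String) (n : Nat) (result : List String) :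
    swLoopA words (n + 1) result = swLoopA words n (swStep words result) := rfl

theorem swLoopA_eq_iterate (words : List String) (n : Nat) :
    ∀ result, swLoopA words n result = (swStep words)^[n] result := by
  induction n with
  | zero => intro r; rfl
  | succ n ih =>
    intro r
    rw [swLoopA_step, Function.iterate_succ_apply]
    exact ih _

theorem shortest_words_eq_iterate (words : List String) (top_n : Int) :
    shortest_words words top_n = (swStep words)^[top_n.toNat] [] := by
  show swLoopA words top_n.toNat [] = _
  exact swLoopA_eq_iterate words top_n.toNat []

theorem swInner_eq_min? (words result : List String) :
    swInner words result
      = PySem.List.min? (words.filter (fun w => !(result.contains w))) PySem.Str.len := by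
  unfold swInner PySem.List.min?
  refine (PySem.List.foldl_if_eq_foldl_filter _ _ words none).trans ?_
  congr 1
  funext a b
  cases a <;> rfl

theorem foldl_min_keep {α κ : Type} [LinearOrder κ] (key : α → κ) (m : α) (l : List α)
    (h : ∀ y ∈ l, ¬ key y < key m) :
    l.foldl
      (fun acc x =>
        match acc with
        | none => some x
        | some m' => if key x < key m' then some x else some m')
      (some m) = some m := by
  induction l with
  | nil => rfl
  | cons y t ih =>
    have hy : ¬ key y < key m := h y (by simp)
    rw [List.foldl_cons]
    show List.foldl
        (fun acc x =>
          match acc with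
          | none => some x
          | some m' => if key x < key m' then some x else some m')
        (if key y < key m then some y else some m) t = some m
    rw [if_neg hy]
    exact ih (fun z hz => h z (by simp [hz]))

theorem min?_first {α κ : Type} [LinearOrder κ] (key : α → κ) (x : α) (t₁ t₂ : List α)
    (h₁ : ∀ y ∈ t₁, key x < key y) (h₂ : ∀ y ∈ t₂, ¬ key y < key x) :
    PySem.List.min? (t₁ ++ x :: t₂) key = some x := by
  unfold PySem.List.min?
  rw [List.foldl_append]
  rcases hr : PySem.List.min? t₁ key with _ | m
  · unfold PySem.List.min? at hr
    rw [hr, List.foldl_cons]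
    exact foldl_min_keep key x t₂ h₂
  · have hm : m ∈ t₁ := PySem.List.min?_mem hr
    unfold PySem.List.min? at hr
    rw [hr, List.foldl_cons]
    have hlt : key x < key m := h₁ m hm
    show List.foldl
        (fun acc x' =>
          match acc with
          | none => some x'
          | some m' => if key x' < key m' then some x' else some m')
        (if key x < key m then some x else some m) t₂ = some x
    rw [if_pos hlt]
    exact foldl_min_keep key x t₂ h₂

theorem sublist_foldl_add {α : Type} [BEq α] (ws : List α) (l : List α) :
    l.Sublist (List.foldl PySem.Set.add l ws) := by
  induction ws generalizing l with
  | nil => exact List.Sublist.refl l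
  | cons w ws ih =>
    have h1 : l.Sublist (PySem.Set.add l w) := by
      unfold PySem.Set.add
      split
      · exact List.Sublist.refl l
      · exact List.sublist_append_left l [w]
    exact h1.trans (ih (PySem.Set.add l w))

theorem first_split {α : Type} {x : α} {l : List α} (h : x ∈ l) :
    ∃ l₁ l₂, l = l₁ ++ x :: l₂ ∧ x ∉ l₁ := by
  induction l with
  | nil => cases h
  | cons a t ih =>
    by_cases hax : x = a
    · exact ⟨[], t, by simp [hax], by simp⟩
    · have ht : x ∈ t := by
        rcases List.mem_cons.mp h with h' | h'
        · exact absurd h' hax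
        · exact h'
      obtain ⟨l₁, l₂, he, hn⟩ := ih ht
      exact ⟨a :: l₁, l₂, by rw [he]; rfl, by simp [hax, hn]⟩

theorem first_split_unique {α : Type} {x : α} {u₁ : List α} : ∀ {v₁ u₂ v₂ : List α},
    u₁ ++ x :: u₂ = v₁ ++ x :: v₂ → x ∉ u₁ → x ∉ v₁ → u₁ = v₁ := by
  induction u₁ with
  | nil =>
    intro v₁ u₂ v₂ h hu hv
    cases v₁ with
    | nil => rfl
    | cons b t =>
      simp only [List.nil_append, List.cons_append] at h
      have hb := (List.cons.injEq _ _ _ _).mp h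
      exact absurd (by simp [hb.1]) hv
  | cons a t ih =>
    intro v₁ u₂ v₂ h hu hv
    cases v₁ with
    | nil =>
      simp only [List.nil_append, List.cons_append] at h
      have hb := (List.cons.injEq _ _ _ _).mp h.symm
      exact absurd (by simp [hb.1]) hu
    | cons b s =>
      simp only [List.cons_append] at h
      have hb := (List.cons.injEq _ _ _ _).mp h
      have hts : t = s := ih hb.2 (fun hxx => hu (by simp [hxx])) (fun hxx => hv (by simp [hxx]))
      rw [hb.1, hts]

theorem dedup_before {α : Type} [BEq α] [LawfulBEq α] {x y : α} {w₁ w₂ : List α}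
    (hx : x ∉ w₁) (hy : y ∈ w₁) :
    [y, x].Sublist (PySem.List.dedup (w₁ ++ x :: w₂)) := by
  show [y, x].Sublist (PySem.Set.ofList (w₁ ++ x :: w₂))
  unfold PySem.Set.ofList
  rw [List.foldl_append, List.foldl_cons]
  have hofl : List.foldl PySem.Set.add PySem.Set.empty w₁ = PySem.Set.ofList w₁ := rfl
  rw [hofl]
  have hnc : ¬ ((PySem.Set.ofList w₁).contains x = true) := by
    simp only [PySem.Set.contains, List.contains_eq_mem, decide_eq_true_eq, PySem.Set.mem_ofList]
    exact hx
  have hadd : PySem.Set.add (PySem.Set.ofList w₁) x = PySem.Set.ofList w₁ ++ [x] := by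
    unfold PySem.Set.add
    rw [if_neg hnc]
  rw [hadd]
  have hyx : [y, x].Sublist (PySem.Set.ofList w₁ ++ [x]) := by
    have h1 : [y].Sublist (PySem.Set.ofList w₁) :=
      List.singleton_sublist.mpr ((PySem.Set.mem_ofList w₁ y).mpr hy)
    exact List.Sublist.append h1 (List.Sublist.refl [x])
  exact hyx.trans (sublist_foldl_add w₂ _)

theorem filter_eq_nil_of_gt {α κ : Type} [LinearOrder κ] (key : α → κ) (c : κ) (l : List α)
    (h : ∀ a ∈ l, c < key a) :
    l.filter (fun a => decide (key a = c)) = [] := by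
  apply List.filter_eq_nil_iff.mpr
  intro a ha
  simp only [decide_eq_true_eq]
  exact fun he => absurd (he ▸ h a ha) (lt_irrefl c)

theorem filter_insertBy {α κ : Type} [LinearOrder κ] (key : α → κ) (c : κ) (x : α) :
    ∀ (ys : List α), ys.Pairwise (fun a b => key a ≤ key b) →
    (PySem.List.insertBy (fun a b => decide (key a < key b)) x ys).filter
        (fun a => decide (key a = c))
      = if key x = c then ys.filter (fun a => decide (key a = c)) ++ [x]
        else ys.filter (fun a => decide (key a = c)) := by
  intro ys
  induction ys with
  | nil =>
    intro _
    by_cases hc : key x = c <;> simp [PySem.List.insertBy, hc]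
  | cons y t ih =>
    intro hp
    have hpt : t.Pairwise (fun a b => key a ≤ key b) := hp.tail
    have hyt : ∀ a ∈ t, key y ≤ key a := fun a ha => (List.pairwise_cons.mp hp).1 a ha
    by_cases hlt : key x < key y
    · have hins : PySem.List.insertBy (fun a b => decide (key a < key b)) x (y :: t)
          = x :: y :: t := by
        simp [PySem.List.insertBy, hlt]
      rw [hins]
      by_cases hc : key x = c
      · have hnil : (y :: t).filter (fun a => decide (key a = c)) = [] := by
          apply filter_eq_nil_of_gt key c
          intro a ha
          rcases List.mem_cons.mp ha with h' | h'
          · rw [← hc, h']; exact hlt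
          · rw [← hc]; exact lt_of_lt_of_le hlt (hyt a h')
        simp [hc, hnil]
      · simp [hc]
    · have hins : PySem.List.insertBy (fun a b => decide (key a < key b)) x (y :: t)
          = y :: PySem.List.insertBy (fun a b => decide (key a < key b)) x t := by
        simp [PySem.List.insertBy, hlt]
      rw [hins, List.filter_cons, ih hpt]
      by_cases hc : key x = c <;> by_cases hyc : key y = c <;>
        simp [hc, hyc]

theorem sorted_foldl_filter_key {α κ : Type} [LinearOrder κ] (key : α → κ) (c : κ) :
    ∀ (xs acc : List α), acc.Pairwise (fun a b => key a ≤ key b) →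
    (xs.foldl (fun acc x => PySem.List.insertBy (fun a b => decide (key a < key b)) x acc) acc).filter
        (fun a => decide (key a = c))
      = acc.filter (fun a => decide (key a = c)) ++ xs.filter (fun a => decide (key a = c)) := by
  intro xs
  induction xs with
  | nil => intro acc _; simp
  | cons x t ih =>
    intro acc hp
    rw [List.foldl_cons, ih _ (PySem.List.insertBy_pairwise_le key x acc hp),
        filter_insertBy key c x acc hp, List.filter_cons]
    by_cases hc : key x = c <;> simp [hc]

theorem sorted_filter_key {α κ : Type} [LinearOrder κ] (key : α → κ) (c : κ) (xs : List α) :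
    (PySem.List.sorted xs key).filter (fun a => decide (key a = c))
      = xs.filter (fun a => decide (key a = c)) := by
  rw [PySem.List.sorted_eq_foldl_insertBy]
  simpa using sorted_foldl_filter_key key c xs [] List.Pairwise.nil

theorem sublist_pair_sorted {α κ : Type} [LinearOrder κ] (key : α → κ) {a b : α} {xs : List α}
    (h : [a, b].Sublist xs) (hk : key a = key b) :
    [a, b].Sublist (PySem.List.sorted xs key) := by
  have h2 : [a, b].filter (fun z => decide (key z = key a)) = [a, b] := by
    simp [hk]
  have h3 : [a, b].Sublist (xs.filter (fun z => decide (key z = key a))) := by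
    rw [← h2]
    exact List.Sublist.filter _ h
  rw [← sorted_filter_key key (key a) xs] at h3
  exact h3.trans List.filter_sublist

theorem not_sublist_pair {α : Type} {x y : α} {u v : List α}
    (hxu : x ∉ u) (hxv : x ∉ v) (hyu : y ∉ u) (hxy : y ≠ x) :
    ¬ ([y, x].Sublist (u ++ x :: v)) := by
  intro h
  rw [List.sublist_append_iff] at h
  obtain ⟨l₁, l₂, heq, h1, h2⟩ := h
  rcases l₁ with _ | ⟨a, _ | ⟨b, l⟩⟩
  · simp only [List.nil_append] at heq
    rw [← heq] at h2
    rcases List.sublist_cons_iff.mp h2 with h' | ⟨r, hr, _⟩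
    · exact hxv (h'.subset (by simp))
    · exact hxy (by injection hr)
  · simp only [List.cons_append] at heq
    injection heq with hy _
    subst hy
    exact hyu (h1.subset (by simp))
  · simp only [List.cons_append] at heq
    injection heq with hy heq2
    injection heq2 with hx' _
    subst hx'
    exact hxu (h1.subset (by simp))

set_option maxHeartbeats 1000000 in
theorem swInner_take (words : List String) (k : Nat) (hk : k < (swSorted words).length) :
    swInner words ((swSorted words).take k) = some ((swSorted words)[k]) := by
  set x : String := (swSorted words)[k] with hxd
  set p : String → Bool := fun w => !(((swSorted words).take k).contains w) with hp
  have hdecomp : swSorted words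
      = (swSorted words).take k ++ x :: (swSorted words).drop (k + 1) := by
    rw [hxd, ← List.drop_eq_getElem_cons hk, List.take_append_drop]
  have hnd2 : ((swSorted words).take k ++ x :: (swSorted words).drop (k + 1)).Nodup :=
    hdecomp ▸ swSorted_nodup words
  rw [List.nodup_append] at hnd2
  obtain ⟨hnd_take, hnd_rest, hdisj⟩ := hnd2
  have hxu : x ∉ (swSorted words).take k :=
    fun hx => hdisj _ hx _ (List.mem_cons_self) rfl
  have hxv : x ∉ (swSorted words).drop (k + 1) :=
    (List.nodup_cons.mp hnd_rest).1
  have hxw : x ∈ words := (swSorted_mem words _).mp (hxd ▸ List.getElem_mem hk)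
  have hpx : p x = true := by
    rw [hp]
    simp only [Bool.not_eq_eq_eq_not, Bool.not_true, List.contains_eq_mem,
      decide_eq_false_iff_not]
    exact hxu
  have hmem_t : ∀ y, y ∈ words.filter p → y ∈ words ∧ y ∉ (swSorted words).take k := by
    intro y hy
    have hmf := List.mem_filter.mp hy
    refine ⟨hmf.1, ?_⟩
    have hb := hmf.2
    rw [hp] at hb
    simp only [Bool.not_eq_eq_eq_not, Bool.not_true, List.contains_eq_mem,
      decide_eq_false_iff_not] at hb
    exact hb
  have hmin : ∀ y ∈ words.filter p, ¬ PySem.Str.len y < PySem.Str.len x := by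
    intro y hy
    obtain ⟨hyw, hyt⟩ := hmem_t y hy
    have hys : y ∈ swSorted words := (swSorted_mem words y).mpr hyw
    rw [hdecomp] at hys
    rcases List.mem_append.mp hys with h' | h'
    · exact absurd h' hyt
    · rcases List.mem_cons.mp h' with h'' | h''
      · rw [h'']; exact lt_irrefl _
      · obtain ⟨j, hj, hje⟩ := List.mem_iff_getElem.mp h''
        have hjlen : k + 1 + j < (swSorted words).length := by
          have hjl := hj
          simp only [List.length_drop] at hjl
          omega
        have hje' : y = (swSorted words)[k + 1 + j]'hjlen := by
          rw [← hje, List.getElem_drop]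
        have hmono := swSorted_mono words (p := k) (q := k + 1 + j) (by omega) hjlen
        rw [hje', hxd]
        exact not_lt.mpr hmono
  have hxt : x ∈ words.filter p := List.mem_filter.mpr ⟨hxw, hpx⟩
  obtain ⟨t₁, t₂, ht, hxnot⟩ := first_split hxt
  have h₁ : ∀ y ∈ t₁, PySem.Str.len x < PySem.Str.len y := by
    intro y hy1
    have hyt : y ∈ words.filter p := by
      rw [ht]; exact List.mem_append_left _ hy1
    have hle : ¬ PySem.Str.len y < PySem.Str.len x := hmin y hyt
    by_contra hnot
    have heq : PySem.Str.len y = PySem.Str.len x :=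
      le_antisymm (not_lt.mp hnot) (not_lt.mp hle)
    have hyx : y ≠ x := fun he => hxnot (he ▸ hy1)
    obtain ⟨w₁, w₂, hw, hxw1⟩ := first_split hxw
    have ht' : words.filter p = w₁.filter p ++ x :: w₂.filter p := by
      conv_lhs => rw [hw]
      rw [List.filter_append, List.filter_cons, if_pos hpx]
    have hxnf : x ∉ w₁.filter p := fun hc => hxw1 (List.mem_filter.mp hc).1
    have ht₁ : t₁ = w₁.filter p :=
      first_split_unique (by rw [← ht, ← ht']) hxnot hxnf
    have hyw1 : y ∈ w₁ := (List.mem_filter.mp (ht₁ ▸ hy1)).1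
    have hsub_d : [y, x].Sublist (PySem.List.dedup words) := by
      rw [hw]
      exact dedup_before hxw1 hyw1
    have hsub_s : [y, x].Sublist (swSorted words) :=
      sublist_pair_sorted PySem.Str.len hsub_d heq
    exact not_sublist_pair hxu hxv (hmem_t y hyt).2 hyx (hdecomp ▸ hsub_s)
  have h₂ : ∀ y ∈ t₂, ¬ PySem.Str.len y < PySem.Str.len x := by
    intro y hy2
    exact hmin y (by rw [ht]; exact List.mem_append_right _ (by simp [hy2]))
  rw [swInner_eq_min?]
  rw [show (fun w => !(((swSorted words).take k).contains w)) = p from hp.symm]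
  rw [ht]
  exact min?_first PySem.Str.len x t₁ t₂ h₁ h₂

theorem swIterate_take (words : List String) (k : Nat) :
    (swStep words)^[k] [] = (swSorted words).take k := by
  induction k with
  | zero => simp
  | succ k ih =>
    rw [Function.iterate_succ_apply', ih]
    by_cases hk : k < (swSorted words).length
    · unfold swStep
      rw [swInner_take words k hk]
      rw [List.take_add_one, List.getElem?_eq_getElem hk]
      rfl
    · have hk : (swSorted words).length ≤ k := not_lt.mp hk
      have h1 : (swSorted words).take k = swSorted words := List.take_of_length_le hk
      have h2 : (swSorted words).take (k + 1) = swSorted words :=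
        List.take_of_length_le (by omega)
      rw [h1, h2]
      unfold swStep
      have hnone : swInner words (swSorted words) = none := by
        rw [swInner_eq_min?]
        have hnil : words.filter (fun w => !((swSorted words).contains w)) = [] := by
          apply List.filter_eq_nil_iff.mpr
          intro w hw
          have hws : w ∈ swSorted words := (swSorted_mem words w).mpr hw
          simp [List.contains_eq_mem, hws]
        rw [hnil]
        rfl
      rw [hnone]

-- ===== VERDICT (by name: the statement is the Claim_ definition above) =====
theorem shortest_words_spec : Claim_equal_shortest_words := by
  intro words top_n _
  show shortest_words words top_n = shortest_words_alt words top_n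
  rw [shortest_words_eq_iterate, swIterate_take]
  show List.take top_n.toNat (swSorted words)
      = PySem.List.slice (swSorted words) none (some (max top_n 0))
  rw [PySem.List.slice_to _ (le_max_right top_n 0)]
  have hmax : (max top_n 0).toNat = top_n.toNat := by
    rcases le_total top_n 0 with h | h
    · rw [max_eq_right h]; omega
    · rw [max_eq_left h]
  rw [hmax]
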